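-- pv_equiv track=rewrite | github.com/Pooryamb/benchmark_structural_aligners4pfam_annotation | scripts/map_sites_on_seeds.py | map_sites2seeds
-- ===== SOURCE A (Python) =====
-- def find_all_occurrences(main_string, substring):
--     """Finds all starting indices of a substring in a main string."""
--     indices = []
--     start_index = 0
--     while True:
--         index = main_string.find(substring, start_index)
--         if index == -1:  # No more occurrences found
--             break
--         indices.append(index)
--         start_index = index + 1 # Move start_index to search after the found occurrence
--     return indices
--
-- def map_sites2seeds(fl_seq, fl_sites, dom_seq):
--     """Takes the full-length sequence + its sites + domain sequence as input and returns the corresponding sites on the domain"""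
--     domain_offsets = find_all_occurrences(fl_seq, dom_seq)
--     all_sites = set()
--     for offset in domain_offsets:
--         fl_sites_py_ind_offset = [x-offset for x in fl_sites]
--         eligible_sites_first_occ = [x for x in fl_sites_py_ind_offset if x > 0 and x <= len(dom_seq)]
--         all_sites = all_sites.union(set(eligible_sites_first_occ))
--     return sorted(list(all_sites))
-- ===== SOURCE B (Python) =====
-- def map_sites2seeds(fl_seq, fl_sites, dom_seq):
--     """Takes the full-length sequence + its sites + domain sequence as input and returns the corresponding sites on the domain"""
--     n, m = len(fl_seq), len(dom_seq)
--     # occurrence table: occ[i] <=> dom_seq starts at position i of fl_seq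
--     occ = [fl_seq[i:i + m] == dom_seq for i in range(n - m + 1)]
--     # site-major: each site s can only land on occurrences in the window [s-m, s-1]
--     mapped = {s - o
--               for s in set(fl_sites)
--               for o in range(max(0, s - m), min(len(occ), s))
--               if occ[o]}
--     return sorted(mapped)
-- ===== Notes on version B (the rewrite author's own statement) =====
-- stated objective: alternative
-- what changed: A is offset-major (repeated str.find to list occurrences, then filters the whole site list per occurrence and unions sets); B is site-major: it builds an occurrence table once by slice comparison and, for each distinct site, scans only the length-m window of offsets that can map it, collecting results in one set comprehension.
import Mathlib
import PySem

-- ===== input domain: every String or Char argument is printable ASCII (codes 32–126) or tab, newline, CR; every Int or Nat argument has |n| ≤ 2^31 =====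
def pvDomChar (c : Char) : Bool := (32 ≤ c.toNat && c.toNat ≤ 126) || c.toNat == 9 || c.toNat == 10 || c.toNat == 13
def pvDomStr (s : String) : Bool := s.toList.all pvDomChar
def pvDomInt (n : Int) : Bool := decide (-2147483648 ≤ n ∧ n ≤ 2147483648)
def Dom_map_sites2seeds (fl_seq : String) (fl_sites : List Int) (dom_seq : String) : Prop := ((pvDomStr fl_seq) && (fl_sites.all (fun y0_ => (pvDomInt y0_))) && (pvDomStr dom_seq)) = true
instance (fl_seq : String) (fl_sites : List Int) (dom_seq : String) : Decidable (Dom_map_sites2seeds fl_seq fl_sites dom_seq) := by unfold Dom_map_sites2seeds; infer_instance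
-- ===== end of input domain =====

-- B replaces A's offset-major pass (repeated str.find, then a full filter of the site
-- list per occurrence) with a site-major pass over a slice-built occurrence table;
-- objective: alternative (similar cost, genuinely different traversal).

-- ===== PORT A =====
-- the 'while True' find loop of find_all_occurrences; fuel only makes the recursion
-- structural (it is never exhausted: start strictly increases and is ≤ len+1)
def find_all_occurrences_loop (main sub : List Char) : Nat → Nat → List Int → List Int
  | 0, _, indices => indices
  | fuel + 1, start_index, indices =>
    let index := PySem.Chars.findFrom main sub (start_index : Int) none
    if index = -1 then indices
    else find_all_occurrences_loop main sub fuel (index.toNat + 1) (indices ++ [index])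

def find_all_occurrences (main_string substring : List Char) : List Int :=
  find_all_occurrences_loop main_string substring (main_string.length + 2) 0 []

def map_sites2seeds (fl_seq : String) (fl_sites : List Int) (dom_seq : String) : List Int :=
  let domain_offsets := find_all_occurrences fl_seq.toList dom_seq.toList
  let all_sites : PySem.Set Int :=
    domain_offsets.foldl (fun all_sites offset =>
      let fl_sites_py_ind_offset := fl_sites.map (fun x => x - offset)
      let eligible_sites_first_occ := fl_sites_py_ind_offset.filter
        (fun x => decide (0 < x) && decide (x ≤ PySem.Str.len dom_seq))
      PySem.Set.union all_sites (PySem.Set.ofList eligible_sites_first_occ))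
      PySem.Set.empty
  PySem.List.sorted all_sites (fun x => x)

-- ===== PORT B =====
def map_sites2seeds_alt (fl_seq : String) (fl_sites : List Int) (dom_seq : String) : List Int :=
  let s := fl_seq.toList
  let d := dom_seq.toList
  let n : Int := s.length
  let m : Int := d.length
  let occ : List Bool :=
    (PySem.List.pyRange 0 (n - m + 1)).map
      (fun i => PySem.List.slice s (some i) (some (i + m)) == d)
  let mapped : PySem.Set Int :=
    (PySem.Set.ofList fl_sites).foldl (fun acc sv =>
      (PySem.List.pyRange (max 0 (sv - m)) (min (occ.length : Int) sv)).foldl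
        (fun acc2 o => if PySem.List.pyGetD occ o false then PySem.Set.add acc2 (sv - o) else acc2)
        acc)
      PySem.Set.empty
  PySem.List.sorted mapped (fun x => x)

-- ===== PRECONDITION & SPEC =====
def Spec_map_sites2seeds (fl_seq : String) (fl_sites : List Int) (dom_seq : String) (out : List Int) : Prop := out = map_sites2seeds_alt fl_seq fl_sites dom_seq
instance (fl_seq : String) (fl_sites : List Int) (dom_seq : String) (out : List Int) : Decidable (Spec_map_sites2seeds fl_seq fl_sites dom_seq out) := by unfold Spec_map_sites2seeds; infer_instance

-- ===== CLAIM (what is proved, stated in full; the proofs are below) =====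
def Claim_equal_map_sites2seeds : Prop := ∀ (fl_seq : String) (fl_sites : List Int) (dom_seq : String), Dom_map_sites2seeds fl_seq fl_sites dom_seq → Spec_map_sites2seeds fl_seq fl_sites dom_seq (map_sites2seeds fl_seq fl_sites dom_seq)

-- ===== LEMMAS AND PROOFS =====

-- the common value set: x is sv - k for a site sv and an occurrence k of d in s, 1 <= x <= |d|
def SitesP (s d : List Char) (sites : List Int) (x : Int) : Prop :=
  ∃ k : Nat, k ≤ s.length ∧ d <+: s.drop k ∧
    ∃ sv ∈ sites, x = sv - (k : Int) ∧ 0 < x ∧ x ≤ (d.length : Int)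

theorem findFrom_past (s sub : List Char) :
    PySem.Chars.findFrom s sub ((s.length : Int) + 1) none = -1 := by
  unfold PySem.Chars.findFrom
  have h1 : ¬((s.length : Int) + 1 < 0) := by omega
  have h2 : (s.length : Int) < (s.length : Int) + 1 := by omega
  simp [h1, h2]

theorem mem_fao_loop (main sub : List Char) (x : Int) :
    ∀ (fuel start : Nat) (acc : List Int), start ≤ main.length + 1 →
      main.length + 1 ≤ fuel + start →
      (x ∈ find_all_occurrences_loop main sub fuel start acc ↔
        x ∈ acc ∨ ∃ k : Nat, start ≤ k ∧ k ≤ main.length ∧ sub <+: main.drop k ∧ x = (k : Int)) := by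
  intro fuel
  induction fuel with
  | zero =>
    intro start acc h1 h2
    simp only [find_all_occurrences_loop]
    constructor
    · exact Or.inl
    · rintro (h | ⟨k, hk1, hk2, -, -⟩)
      · exact h
      · omega
  | succ fuel ih =>
    intro start acc h1 h2
    simp only [find_all_occurrences_loop]
    by_cases hs : start ≤ main.length
    · by_cases hneg : PySem.Chars.findFrom main sub (start : Int) none = -1
      · rw [if_pos hneg]
        rw [PySem.Chars.findFrom_natCast_eq_neg_one_iff main sub start hs] at hneg
        constructor
        · exact Or.inl
        · rintro (h | ⟨k, hk1, hk2, hpre, hx⟩)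
          · exact h
          · exfalso
            apply hneg
            rw [← PySem.Chars.isIn_iff_infix, ← PySem.Chars.exists_prefix_drop_iff_isIn]
            refine ⟨k - start, ?_⟩
            have hdd : (List.drop start main).drop (k - start) = main.drop k := by
              rw [List.drop_drop]; congr 1; omega
            rw [hdd]; exact hpre
      · rw [if_neg hneg]
        obtain ⟨hge, hpre, hmin⟩ := PySem.Chars.findFrom_natCast_spec main sub start hs hneg
        have hf := PySem.Chars.findFrom_natCast main sub start hs
        by_cases h0 : PySem.Chars.find (main.drop start) sub = -1
        · rw [hf, if_pos h0] at hneg; exact absurd rfl hneg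
        · have hr : PySem.Chars.findFrom main sub (start : Int) none
              = (start : Int) + PySem.Chars.find (main.drop start) sub := by rw [hf, if_neg h0]
          have hrle := PySem.Chars.find_le_length (main.drop start) sub
          have hdl : (main.drop start).length = main.length - start := List.length_drop
          rw [hdl] at hrle
          have hle : PySem.Chars.findFrom main sub (start : Int) none ≤ (main.length : Int) := by
            rw [hr]; omega
          have hnn : (0 : Int) ≤ PySem.Chars.findFrom main sub (start : Int) none := by
            have : (0 : Int) ≤ (start : Int) := by omega
            omega
          set idx := PySem.Chars.findFrom main sub (start : Int) none with hidx
          have hidxNat : ((idx.toNat : Nat) : Int) = idx := Int.toNat_of_nonneg hnn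
          rw [ih (idx.toNat + 1) (acc ++ [idx]) (by omega) (by omega)]
          simp only [List.mem_append, List.mem_singleton]
          constructor
          · rintro ((h | h) | ⟨k, hk1, hk2, hp, hx⟩)
            · exact Or.inl h
            · exact Or.inr ⟨idx.toNat, by omega, by omega, hpre, by rw [h, hidxNat]⟩
            · exact Or.inr ⟨k, by omega, hk2, hp, hx⟩
          · rintro (h | ⟨k, hk1, hk2, hp, hx⟩)
            · exact Or.inl (Or.inl h)
            · rcases lt_trichotomy k idx.toNat with hlt | heq | hgt
              · exact absurd hp (hmin k hk1 hlt)
              · subst heq; exact Or.inl (Or.inr (by rw [hx, hidxNat]))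
              · exact Or.inr ⟨k, by omega, hk2, hp, hx⟩
    · have hstart : start = main.length + 1 := by omega
      have hcast : ((start : Nat) : Int) = (main.length : Int) + 1 := by omega
      rw [hcast, findFrom_past, if_pos rfl]
      constructor
      · exact Or.inl
      · rintro (h | ⟨k, hk1, hk2, -, -⟩)
        · exact h
        · omega

theorem mem_fao (main sub : List Char) (x : Int) :
    x ∈ find_all_occurrences main sub ↔
      ∃ k : Nat, k ≤ main.length ∧ sub <+: main.drop k ∧ x = (k : Int) := by
  unfold find_all_occurrences
  rw [mem_fao_loop main sub x (main.length + 2) 0 [] (by omega) (by omega)]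
  simp

theorem nodup_foldl_pres {α : Type} (F : PySem.Set Int → α → PySem.Set Int)
    (hF : ∀ acc v, List.Nodup acc → List.Nodup (F acc v)) :
    ∀ (l : List α) (acc : PySem.Set Int), List.Nodup acc → List.Nodup (l.foldl F acc) := by
  intro l
  induction l with
  | nil => intro acc h; simpa using h
  | cons v t ih => intro acc h; exact ih _ (hF _ _ h)

theorem mem_foldl_union (f : Int → List Int) (x : Int) :
    ∀ (offs : List Int) (acc : PySem.Set Int),
      x ∈ offs.foldl (fun a off => PySem.Set.union a (PySem.Set.ofList (f off))) acc ↔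
        x ∈ acc ∨ ∃ off ∈ offs, x ∈ f off := by
  intro offs
  induction offs with
  | nil => intro acc; simp
  | cons o t ih =>
    intro acc
    simp only [List.foldl_cons, ih, PySem.Set.mem_union, PySem.Set.mem_ofList, List.mem_cons]
    constructor
    · rintro ((h | h) | ⟨o', ho', h⟩)
      exacts [Or.inl h, Or.inr ⟨o, Or.inl rfl, h⟩, Or.inr ⟨o', Or.inr ho', h⟩]
    · rintro (h | ⟨o', (rfl | ho'), h⟩)
      exacts [Or.inl (Or.inl h), Or.inl (Or.inr h), Or.inr ⟨o', ho', h⟩]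

theorem mem_foldl_addIf (g : Int → Bool) (h : Int → Int) (x : Int) :
    ∀ (r : List Int) (acc : PySem.Set Int),
      x ∈ r.foldl (fun a o => if g o then PySem.Set.add a (h o) else a) acc ↔
        x ∈ acc ∨ ∃ o ∈ r, g o = true ∧ x = h o := by
  intro r
  induction r with
  | nil => intro acc; simp
  | cons o t ih =>
    intro acc
    simp only [List.foldl_cons, List.mem_cons]
    by_cases hg : g o = true
    · rw [if_pos hg, ih]
      simp only [PySem.Set.mem_add]
      constructor
      · rintro ((h1 | h1) | ⟨o', ho', h1, h2⟩)
        exacts [Or.inl h1, Or.inr ⟨o, Or.inl rfl, hg, h1⟩, Or.inr ⟨o', Or.inr ho', h1, h2⟩]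
      · rintro (h1 | ⟨o', (rfl | ho'), h1, h2⟩)
        exacts [Or.inl (Or.inl h1), Or.inl (Or.inr h2), Or.inr ⟨o', ho', h1, h2⟩]
    · rw [if_neg hg, ih]
      constructor
      · rintro (h1 | ⟨o', ho', h1, h2⟩)
        exacts [Or.inl h1, Or.inr ⟨o', Or.inr ho', h1, h2⟩]
      · rintro (h1 | ⟨o', (rfl | ho'), h1, h2⟩)
        exacts [Or.inl h1, absurd h1 hg, Or.inr ⟨o', ho', h1, h2⟩]

theorem mem_foldl_step (x : Int) (Q : Int → Int → Prop) (F : PySem.Set Int → Int → PySem.Set Int)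
    (hF : ∀ acc sv, x ∈ F acc sv ↔ x ∈ acc ∨ Q sv x) :
    ∀ (svs : List Int) (acc : PySem.Set Int),
      x ∈ svs.foldl F acc ↔ x ∈ acc ∨ ∃ sv ∈ svs, Q sv x := by
  intro svs
  induction svs with
  | nil => intro acc; simp
  | cons sv t ih =>
    intro acc
    simp only [List.foldl_cons, ih, hF, List.mem_cons]
    constructor
    · rintro ((h | h) | ⟨sv', hsv', h⟩)
      exacts [Or.inl h, Or.inr ⟨sv, Or.inl rfl, h⟩, Or.inr ⟨sv', Or.inr hsv', h⟩]
    · rintro (h | ⟨sv', (rfl | hsv'), h⟩)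
      exacts [Or.inl (Or.inl h), Or.inl (Or.inr h), Or.inr ⟨sv', hsv', h⟩]

theorem occ_eval (s d : List Char) (k : Nat)
    (hk : (k : Int) < (s.length : Int) - (d.length : Int) + 1) :
    ((PySem.List.pyGetD ((PySem.List.pyRange 0 ((s.length : Int) - (d.length : Int) + 1)).map
        (fun i => PySem.List.slice s (some i) (some (i + (d.length : Int))) == d)) ((k : Nat) : Int) false) = true
      ↔ d <+: s.drop k) := by
  have hlen : ((PySem.List.pyRange 0 ((s.length : Int) - (d.length : Int) + 1)).map
      (fun i => PySem.List.slice s (some i) (some (i + (d.length : Int))) == d)).length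
      = ((s.length : Int) - (d.length : Int) + 1).toNat := by
    rw [List.length_map, PySem.List.length_pyRange_one]
    congr 1; omega
  have hklt : k < ((PySem.List.pyRange 0 ((s.length : Int) - (d.length : Int) + 1)).map
      (fun i => PySem.List.slice s (some i) (some (i + (d.length : Int))) == d)).length := by
    rw [hlen]; omega
  rw [PySem.List.pyGetD_natCast, List.getD_eq_getElem _ _ hklt, List.getElem_map,
    PySem.List.getElem_pyRange_one]
  simp only [zero_add]
  rw [PySem.List.slice_natCast_add, beq_iff_eq]
  constructor
  · intro h; rw [List.prefix_iff_eq_take]; exact h.symm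
  · intro h; exact (List.prefix_iff_eq_take.mp h).symm

theorem mem_A (fl_seq : String) (fl_sites : List Int) (dom_seq : String) (x : Int) :
    (x ∈ (find_all_occurrences fl_seq.toList dom_seq.toList).foldl
        (fun all_sites offset =>
          PySem.Set.union all_sites (PySem.Set.ofList
            ((fl_sites.map (fun x => x - offset)).filter
              (fun x => decide (0 < x) && decide (x ≤ PySem.Str.len dom_seq)))))
        PySem.Set.empty) ↔ SitesP fl_seq.toList dom_seq.toList fl_sites x := by
  rw [mem_foldl_union (fun off => (fl_sites.map (fun x => x - off)).filter
      (fun x => decide (0 < x) && decide (x ≤ PySem.Str.len dom_seq))) x]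
  simp only [PySem.Set.empty, List.not_mem_nil, false_or, List.mem_filter, List.mem_map,
    Bool.and_eq_true, decide_eq_true_eq, PySem.Str.len_eq]
  unfold SitesP
  constructor
  · rintro ⟨off, hoff, ⟨sv, hsv, heq⟩, hx1, hx2⟩
    rw [mem_fao] at hoff
    obtain ⟨k, hk, hpre, rfl⟩ := hoff
    exact ⟨k, hk, hpre, sv, hsv, heq.symm, hx1, hx2⟩
  · rintro ⟨k, hk, hpre, sv, hsv, rfl, hx1, hx2⟩
    exact ⟨(k : Int), (mem_fao _ _ _).mpr ⟨k, hk, hpre, rfl⟩, ⟨sv, hsv, rfl⟩, hx1, hx2⟩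

theorem nodup_A (fl_seq : String) (fl_sites : List Int) (dom_seq : String) :
    ((find_all_occurrences fl_seq.toList dom_seq.toList).foldl
        (fun all_sites offset =>
          PySem.Set.union all_sites (PySem.Set.ofList
            ((fl_sites.map (fun x => x - offset)).filter
              (fun x => decide (0 < x) && decide (x ≤ PySem.Str.len dom_seq)))))
        PySem.Set.empty).Nodup :=
  nodup_foldl_pres _ (fun _ _ h => PySem.Set.nodup_union _ _ h) _ _ List.nodup_nil

theorem mem_B (fl_seq : String) (fl_sites : List Int) (dom_seq : String) (x : Int) :
    (x ∈ (PySem.Set.ofList fl_sites).foldl (fun acc sv =>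
        (PySem.List.pyRange (max 0 (sv - (dom_seq.toList.length : Int)))
            (min ((((PySem.List.pyRange 0 ((fl_seq.toList.length : Int) - (dom_seq.toList.length : Int) + 1)).map
              (fun i => PySem.List.slice fl_seq.toList (some i) (some (i + (dom_seq.toList.length : Int))) == dom_seq.toList)).length : Int)) sv)).foldl
          (fun acc2 o => if PySem.List.pyGetD ((PySem.List.pyRange 0 ((fl_seq.toList.length : Int) - (dom_seq.toList.length : Int) + 1)).map
              (fun i => PySem.List.slice fl_seq.toList (some i) (some (i + (dom_seq.toList.length : Int))) == dom_seq.toList)) o false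
            then PySem.Set.add acc2 (sv - o) else acc2)
          acc)
        PySem.Set.empty) ↔ SitesP fl_seq.toList dom_seq.toList fl_sites x := by
  have hlen : ((PySem.List.pyRange 0 ((fl_seq.toList.length : Int) - (dom_seq.toList.length : Int) + 1)).map
      (fun i => PySem.List.slice fl_seq.toList (some i) (some (i + (dom_seq.toList.length : Int))) == dom_seq.toList)).length
      = ((fl_seq.toList.length : Int) - (dom_seq.toList.length : Int) + 1).toNat := by
    rw [List.length_map, PySem.List.length_pyRange_one]
    congr 1; omega
  rw [mem_foldl_step x
    (fun sv y => ∃ o ∈ PySem.List.pyRange (max 0 (sv - (dom_seq.toList.length : Int)))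
        (min ((((PySem.List.pyRange 0 ((fl_seq.toList.length : Int) - (dom_seq.toList.length : Int) + 1)).map
          (fun i => PySem.List.slice fl_seq.toList (some i) (some (i + (dom_seq.toList.length : Int))) == dom_seq.toList)).length : Int)) sv),
        (PySem.List.pyGetD ((PySem.List.pyRange 0 ((fl_seq.toList.length : Int) - (dom_seq.toList.length : Int) + 1)).map
          (fun i => PySem.List.slice fl_seq.toList (some i) (some (i + (dom_seq.toList.length : Int))) == dom_seq.toList)) o false) = true ∧ y = sv - o)
    _ (fun acc sv => mem_foldl_addIf _ _ x _ acc)]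
  simp only [PySem.Set.empty, List.not_mem_nil, false_or, PySem.Set.mem_ofList,
    PySem.List.mem_pyRange_one, hlen]
  unfold SitesP
  constructor
  · rintro ⟨sv, hsv, o, ⟨hlo, hhi⟩, hocc, rfl⟩
    have h0 : (0 : Int) ≤ o := le_trans (le_max_left _ _) hlo
    have hko : ((o.toNat : Nat) : Int) = o := Int.toNat_of_nonneg h0
    have htn := Int.toNat_of_nonneg (a := (fl_seq.toList.length : Int) - (dom_seq.toList.length : Int) + 1)
    have hk : ((o.toNat : Nat) : Int) < (fl_seq.toList.length : Int) - (dom_seq.toList.length : Int) + 1 := by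
      rw [hko]; omega
    rw [← hko] at hocc
    refine ⟨o.toNat, by omega, (occ_eval _ _ _ hk).mp hocc, sv, hsv, by omega, by omega, by omega⟩
  · rintro ⟨k, hk, hpre, sv, hsv, rfl, hx1, hx2⟩
    have hml := hpre.length_le
    rw [List.length_drop] at hml
    have hk2 : ((k : Nat) : Int) < (fl_seq.toList.length : Int) - (dom_seq.toList.length : Int) + 1 := by
      omega
    refine ⟨sv, hsv, (k : Int), ⟨by omega, by omega⟩, (occ_eval _ _ _ hk2).mpr hpre, rfl⟩

theorem nodup_B (fl_seq : String) (fl_sites : List Int) (dom_seq : String) :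
    ((PySem.Set.ofList fl_sites).foldl (fun acc sv =>
        (PySem.List.pyRange (max 0 (sv - (dom_seq.toList.length : Int)))
            (min ((((PySem.List.pyRange 0 ((fl_seq.toList.length : Int) - (dom_seq.toList.length : Int) + 1)).map
              (fun i => PySem.List.slice fl_seq.toList (some i) (some (i + (dom_seq.toList.length : Int))) == dom_seq.toList)).length : Int)) sv)).foldl
          (fun acc2 o => if PySem.List.pyGetD ((PySem.List.pyRange 0 ((fl_seq.toList.length : Int) - (dom_seq.toList.length : Int) + 1)).map
              (fun i => PySem.List.slice fl_seq.toList (some i) (some (i + (dom_seq.toList.length : Int))) == dom_seq.toList)) o false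
            then PySem.Set.add acc2 (sv - o) else acc2)
          acc)
        PySem.Set.empty).Nodup := by
  refine nodup_foldl_pres _ (fun acc sv h => ?_) _ _ List.nodup_nil
  refine nodup_foldl_pres _ (fun a o hh => ?_) _ _ h
  by_cases hg : (PySem.List.pyGetD ((PySem.List.pyRange 0 ((fl_seq.toList.length : Int) - (dom_seq.toList.length : Int) + 1)).map
      (fun i => PySem.List.slice fl_seq.toList (some i) (some (i + (dom_seq.toList.length : Int))) == dom_seq.toList)) o false) = true
  · rw [if_pos hg]; exact PySem.Set.nodup_add _ _ hh
  · rw [if_neg hg]; exact hh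

-- ===== VERDICT (by name: the statement is the Claim_ definition above) =====
theorem map_sites2seeds_spec : Claim_equal_map_sites2seeds := by
  intro fl_seq fl_sites dom_seq _
  unfold Spec_map_sites2seeds map_sites2seeds map_sites2seeds_alt
  apply PySem.List.sorted_eq_sorted_of_perm _ _ _ (fun a b h => h)
  rw [List.perm_ext_iff_of_nodup (nodup_A fl_seq fl_sites dom_seq) (nodup_B fl_seq fl_sites dom_seq)]
  intro a
  rw [mem_A fl_seq fl_sites dom_seq a, mem_B fl_seq fl_sites dom_seq a]
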